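-- pv_equiv track=rewrite | github.com/hamdani2020/Bedrock-agent | inference_to_bedrock_lambda.py | extract_summary
-- ===== SOURCE A (Python) =====
-- def extract_summary(text: str) -> str:
--     """Extract summary from Bedrock response"""
--     lines = text.split('\n')
--     for i, line in enumerate(lines):
--         if 'SUMMARY' in line.upper():
--             # Get the next non-empty line
--             for j in range(i+1, len(lines)):
--                 if lines[j].strip():
--                     return lines[j].strip()
--     return "No summary available"
-- ===== SOURCE B (Python) =====
-- def extract_summary(text: str) -> str:
--     """Extract summary from Bedrock response (single pass with a state flag)."""
--     found = False
--     for line in text.split('\n'):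
--         if found:
--             s = line.strip()
--             if s:
--                 return s
--         elif 'SUMMARY' in line.upper():
--             found = True
--     return "No summary available"
-- ===== Notes on version B (the rewrite author's own statement) =====
-- stated objective: simpler
-- what changed: Replaces the nested outer-find/inner-index-scan (enumerate plus range(i+1,len) re-indexing) with one linear pass over the lines carrying a single boolean flag; the inner scan and all index arithmetic disappear.
import Mathlib
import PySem

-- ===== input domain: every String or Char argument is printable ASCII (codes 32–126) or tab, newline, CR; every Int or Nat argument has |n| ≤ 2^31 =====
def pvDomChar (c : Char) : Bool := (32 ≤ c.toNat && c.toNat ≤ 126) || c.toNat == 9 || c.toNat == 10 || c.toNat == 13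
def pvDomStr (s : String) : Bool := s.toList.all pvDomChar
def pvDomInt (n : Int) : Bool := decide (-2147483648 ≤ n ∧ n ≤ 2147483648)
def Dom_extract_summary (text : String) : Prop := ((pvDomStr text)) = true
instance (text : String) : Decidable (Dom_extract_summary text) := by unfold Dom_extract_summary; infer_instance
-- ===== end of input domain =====

-- B replaces A's nested outer-find / inner index scan with one linear pass over the
-- lines carrying a single boolean flag (objective: simpler).

-- ===== PORT A =====
-- inner loop: for j in range(i+1, len(lines)): if lines[j].strip(): return lines[j].strip()
def pvAFind (lines : List String) : List Int → Option String
  | [] => none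
  | j :: js =>
    if PySem.Str.strip (PySem.List.pyGetD lines j "") ≠ "" then
      some (PySem.Str.strip (PySem.List.pyGetD lines j ""))
    else pvAFind lines js

-- outer loop: for i, line in enumerate(lines): if 'SUMMARY' in line.upper(): <inner>
def pvAOuter (lines : List String) : List (Int × String) → String
  | [] => "No summary available"
  | (i, line) :: rest =>
    if PySem.Str.isIn "SUMMARY" (PySem.Str.upper line) then
      match pvAFind lines (PySem.List.pyRange (i + 1) (lines.length : Int) 1) with
      | some s => s
      | none => pvAOuter lines rest
    else pvAOuter lines rest

def extract_summary (text : String) : String :=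
  let lines := (PySem.Chars.splitOn text.toList ['\n']).map String.ofList
  pvAOuter lines (PySem.List.enumerate lines 0)

-- ===== PORT B =====
def pvBLoop : List String → Bool → String
  | [], _ => "No summary available"
  | line :: rest, found =>
    if found then
      if PySem.Str.strip line ≠ "" then PySem.Str.strip line else pvBLoop rest true
    else if PySem.Str.isIn "SUMMARY" (PySem.Str.upper line) then pvBLoop rest true
    else pvBLoop rest false

def extract_summary_alt (text : String) : String :=
  pvBLoop ((PySem.Chars.splitOn text.toList ['\n']).map String.ofList) false

-- ===== PRECONDITION & SPEC =====
def Spec_extract_summary (text : String) (out : String) : Prop := out = extract_summary_alt text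
instance (text : String) (out : String) : Decidable (Spec_extract_summary text out) := by unfold Spec_extract_summary; infer_instance

-- ===== CLAIM (what is proved, stated in full; the proofs are below) =====
def Claim_equal_extract_summary : Prop := ∀ (text : String), Dom_extract_summary text → Spec_extract_summary text (extract_summary text)

-- ===== LEMMAS AND PROOFS =====

-- first non-empty (after strip) line, as an Option
def pvFirstNE : List String → Option String
  | [] => none
  | l :: r => if PySem.Str.strip l ≠ "" then some (PySem.Str.strip l) else pvFirstNE r

lemma pvAOuter_cons (lines : List String) (i : Int) (line : String) (rest : List (Int × String)) :
    pvAOuter lines ((i, line) :: rest) =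
      if PySem.Str.isIn "SUMMARY" (PySem.Str.upper line) = true then
        match pvAFind lines (PySem.List.pyRange (i + 1) (lines.length : Int) 1) with
        | some s => s
        | none => pvAOuter lines rest
      else pvAOuter lines rest := rfl

lemma pvBLoop_cons_false (line : String) (rest : List String) :
    pvBLoop (line :: rest) false =
      if PySem.Str.isIn "SUMMARY" (PySem.Str.upper line) = true then pvBLoop rest true
      else pvBLoop rest false := rfl

lemma pvFirstNE_none_iff (l : List String) :
    pvFirstNE l = none ↔ ∀ x ∈ l, PySem.Str.strip x = "" := by
  induction l with
  | nil => simp [pvFirstNE]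
  | cons a r ih =>
    simp only [pvFirstNE]
    by_cases h : PySem.Str.strip a ≠ ""
    · simp [h]
    · simp only [ne_eq, not_not] at h
      simp [h, ih]

lemma pvAFind_eq (lines : List String) (k : Nat) :
    pvAFind lines (PySem.List.pyRange (k : Int) (lines.length : Int) 1) =
      pvFirstNE (lines.drop k) := by
  induction hn : lines.length - k generalizing k with
  | zero =>
    have hk : lines.length ≤ k := by omega
    rw [PySem.List.pyRange_one_eq_nil (by exact_mod_cast hk)]
    rw [List.drop_eq_nil_of_le hk]
    rfl
  | succ n ih =>
    have hk : k < lines.length := by omega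
    rw [PySem.List.pyRange_one_cons (by exact_mod_cast hk)]
    have hdrop : lines.drop k = lines[k] :: lines.drop (k + 1) :=
      List.drop_eq_getElem_cons hk
    rw [hdrop]
    simp only [pvAFind, pvFirstNE]
    have hget : PySem.List.pyGetD lines (k : Int) "" = lines[k] := by
      rw [PySem.List.pyGetD_natCast]
      exact List.getD_eq_getElem _ _ hk
    rw [hget]
    have hcast : ((k : Int) + 1) = ((k + 1 : Nat) : Int) := by push_cast; ring
    by_cases h : PySem.Str.strip lines[k] ≠ ""
    · rw [if_pos h, if_pos h]
    · rw [if_neg h, if_neg h, hcast]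
      exact ih (k + 1) (by omega)

lemma pvBLoop_true (l : List String) :
    pvBLoop l true = (pvFirstNE l).getD "No summary available" := by
  induction l with
  | nil => rfl
  | cons a r ih =>
    simp only [pvBLoop, pvFirstNE]
    by_cases h : PySem.Str.strip a ≠ ""
    · simp [h]
    · simp only [ne_eq, not_not] at h
      simp [h, ih]

-- once every remaining line strips empty, A's outer loop can only fall through
lemma pvAOuter_all_empty (lines : List String) :
    ∀ (rest : List String) (k : Nat), rest = lines.drop k →
      (∀ x ∈ rest, PySem.Str.strip x = "") →
      pvAOuter lines (PySem.List.enumerate rest (k : Int)) = "No summary available" := by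
  intro rest
  induction rest with
  | nil => intro k _ _; rfl
  | cons line rest' ih =>
    intro k hk hall
    have hrest' : rest' = lines.drop (k + 1) := by
      have := congrArg List.tail hk
      simpa [List.tail_drop] using this
    have hcast : ((k : Int) + 1) = ((k + 1 : Nat) : Int) := by push_cast; ring
    rw [PySem.List.enumerate_cons, pvAOuter_cons]
    have hfindnone :
        pvAFind lines (PySem.List.pyRange ((k : Int) + 1) (lines.length : Int) 1) = none := by
      rw [hcast, pvAFind_eq, ← hrest', pvFirstNE_none_iff]
      intro x hx; exact hall x (List.mem_cons_of_mem _ hx)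
    have hrec : pvAOuter lines (PySem.List.enumerate rest' ((k : Int) + 1)) =
        "No summary available" := by
      rw [hcast]
      exact ih (k + 1) hrest' (fun x hx => hall x (List.mem_cons_of_mem _ hx))
    by_cases h : PySem.Str.isIn "SUMMARY" (PySem.Str.upper line) = true
    · rw [if_pos h, hfindnone]
      exact hrec
    · rw [if_neg h]
      exact hrec

lemma pv_main (lines : List String) :
    ∀ (rest : List String) (k : Nat), rest = lines.drop k →
      pvAOuter lines (PySem.List.enumerate rest (k : Int)) = pvBLoop rest false := by
  intro rest
  induction rest with
  | nil => intro k _; rfl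
  | cons line rest' ih =>
    intro k hk
    have hrest' : rest' = lines.drop (k + 1) := by
      have := congrArg List.tail hk
      simpa [List.tail_drop] using this
    have hcast : ((k : Int) + 1) = ((k + 1 : Nat) : Int) := by push_cast; ring
    rw [PySem.List.enumerate_cons, pvAOuter_cons, pvBLoop_cons_false]
    by_cases h : PySem.Str.isIn "SUMMARY" (PySem.Str.upper line) = true
    · have hfind :
          pvAFind lines (PySem.List.pyRange ((k : Int) + 1) (lines.length : Int) 1) =
            pvFirstNE rest' := by
        rw [hcast, pvAFind_eq, ← hrest']
      rw [if_pos h, if_pos h, hfind, pvBLoop_true]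
      cases hne : pvFirstNE rest' with
      | some s => rfl
      | none =>
        have hall : ∀ x ∈ rest', PySem.Str.strip x = "" :=
          (pvFirstNE_none_iff rest').mp hne
        have hrec : pvAOuter lines (PySem.List.enumerate rest' ((k : Int) + 1)) =
            "No summary available" := by
          rw [hcast]
          exact pvAOuter_all_empty lines rest' (k + 1) hrest' hall
        exact hrec
    · rw [if_neg h, if_neg h]
      rw [hcast]
      exact ih (k + 1) hrest'

-- ===== VERDICT (by name: the statement is the Claim_ definition above) =====
theorem extract_summary_spec : Claim_equal_extract_summary := by
  intro text _
  unfold Spec_extract_summary extract_summary extract_summary_alt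
  exact pv_main ((PySem.Chars.splitOn text.toList ['\n']).map String.ofList)
    ((PySem.Chars.splitOn text.toList ['\n']).map String.ofList) 0 rfl
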